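-- pv_equiv track=rewrite | github.com/chepalina/algorithms | coding_interview/8.py | calculate_coins
-- ===== SOURCE A (Python) =====
-- def calculate_coins(n: int) -> int:
--     # 1/2
--     # 7 -> 0, 1, 2, 3, 4, 5, 6, 7, 8, 9, 10
--     #      0  1  2  2  3  3  4  4  5  5  6
--     #4 -> 1 1 1 1 / 1 1 2/ 2 2
--     #6 -> 111111/11112/1122/222
--     #10 1111111111/111111112/11111122/1111222/112222/22222
--
--     dp = [0]*(n+1)
--     dp[1] = 1
--
--     for i in range(2,n+1):
--         # обработка единички
--         dp[i] = dp[i-1]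
--
--         if i%5==0:
--             dp[i] += 1
--         if i%10==0:
--             dp[i] += 1
--         if i%25==0:
--             dp[i] += 1
--
--     return dp[-1]
-- ===== SOURCE B (Python) =====
-- def calculate_coins(n: int) -> int:
--     # closed form: one "all ones" combination, plus one new combination each
--     # time i reaches a multiple of 5, 10 or 25 -- so count those multiples directly
--     return 1 + n // 5 + n // 10 + n // 25
-- ===== Notes on version B (the rewrite author's own statement) =====
-- stated objective: faster
-- what changed: Replaces the O(n) dynamic-programming array that increments a counter at every multiple of 5/10/25 with the closed form 1 + n//5 + n//10 + n//25.
import Mathlib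
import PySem

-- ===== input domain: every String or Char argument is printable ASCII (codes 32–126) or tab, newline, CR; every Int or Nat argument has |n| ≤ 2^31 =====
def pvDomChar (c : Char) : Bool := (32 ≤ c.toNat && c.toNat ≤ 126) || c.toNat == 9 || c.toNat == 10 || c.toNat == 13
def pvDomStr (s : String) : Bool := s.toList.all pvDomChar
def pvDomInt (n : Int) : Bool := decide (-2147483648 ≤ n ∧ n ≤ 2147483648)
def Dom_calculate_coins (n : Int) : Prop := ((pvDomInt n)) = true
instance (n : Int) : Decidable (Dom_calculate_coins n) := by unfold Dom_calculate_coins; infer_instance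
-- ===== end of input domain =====

-- B replaces A's O(n) dp array with the closed form 1 + n//5 + n//10 + n//25 (objective: faster, measured asymptotic).

-- ===== PORT A =====
-- dp, a Python list used as a mutable array, is ported as Array Int.
-- loop body of 'for i in range(2, n+1)': read dp[i-1], bump on multiples, write dp[i]
-- (inside the loop 1 <= i-1 and i < len(dp), so plain Nat indexing is exactly Python's dp[i-1] / dp[i] = v)
def calcStep (dp : Array Int) (i : Int) : Array Int :=
  let v := dp.getD (i - 1).toNat 0
  let v := if PySem.Int.mod i 5 = 0 then v + 1 else v
  let v := if PySem.Int.mod i 10 = 0 then v + 1 else v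
  let v := if PySem.Int.mod i 25 = 0 then v + 1 else v
  dp.setIfInBounds i.toNat v

def calculate_coins (n : Int) : Int :=
  let dp := Array.replicate (n + 1).toNat (0 : Int)   -- dp = [0]*(n+1)
  let dp := dp.setIfInBounds 1 1                      -- dp[1] = 1  (IndexError when n <= 0: excluded by Pre_)
  let dp := (PySem.List.pyRange 2 (n + 1) 1).foldl calcStep dp
  dp.getD (dp.size - 1) 0                             -- return dp[-1] (dp is nonempty under Pre_)

-- ===== PORT B =====
def calculate_coins_alt (n : Int) : Int :=
  1 + PySem.Int.floordiv n 5 + PySem.Int.floordiv n 10 + PySem.Int.floordiv n 25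

-- ===== PRECONDITION & SPEC =====
-- Pre_ excludes exactly n ≤ 0, where Python A raises IndexError on dp[1] = 1.
def Pre_calculate_coins (n : Int) : Prop := 1 ≤ n
instance (n : Int) : Decidable (Pre_calculate_coins n) := by unfold Pre_calculate_coins; infer_instance
def pvWitness_calculate_coins : Int := 7
def Spec_calculate_coins (n : Int) (out : Int) : Prop := out = calculate_coins_alt n
instance (n : Int) (out : Int) : Decidable (Spec_calculate_coins n out) := by unfold Spec_calculate_coins; infer_instance

-- ===== CLAIM (what is proved, stated in full; the proofs are below) =====
def Claim_equal_calculate_coins : Prop := ∀ (n : Int), Dom_calculate_coins n → Pre_calculate_coins n → Spec_calculate_coins n (calculate_coins n)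

-- ===== LEMMAS AND PROOFS =====

-- one step of the closed form: the count of multiples grows exactly at multiples
lemma alt_step (i : Int) :
    calculate_coins_alt i =
      (((calculate_coins_alt (i - 1)
        + (if PySem.Int.mod i 5 = 0 then 1 else 0))
        + (if PySem.Int.mod i 10 = 0 then 1 else 0))
        + (if PySem.Int.mod i 25 = 0 then 1 else 0)) := by
  unfold calculate_coins_alt
  rw [PySem.Int.floordiv_eq_ediv_of_pos (a := i) (by norm_num : (0:Int) < 5),
      PySem.Int.floordiv_eq_ediv_of_pos (a := i) (by norm_num : (0:Int) < 10),
      PySem.Int.floordiv_eq_ediv_of_pos (a := i) (by norm_num : (0:Int) < 25),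
      PySem.Int.floordiv_eq_ediv_of_pos (a := i - 1) (by norm_num : (0:Int) < 5),
      PySem.Int.floordiv_eq_ediv_of_pos (a := i - 1) (by norm_num : (0:Int) < 10),
      PySem.Int.floordiv_eq_ediv_of_pos (a := i - 1) (by norm_num : (0:Int) < 25),
      PySem.Int.mod_eq_emod_of_pos (a := i) (by norm_num : (0:Int) < 5),
      PySem.Int.mod_eq_emod_of_pos (a := i) (by norm_num : (0:Int) < 10),
      PySem.Int.mod_eq_emod_of_pos (a := i) (by norm_num : (0:Int) < 25)]
  split_ifs <;> omega

-- loop invariant: after processing 2..j the array keeps its size and holds B's value at slot j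
lemma loop_invariant (n : Int) (hn : 1 ≤ n) (j : Int) (h1 : 1 ≤ j) (hj : j ≤ n) :
    ((PySem.List.pyRange 2 (j + 1) 1).foldl calcStep
        ((Array.replicate (n + 1).toNat (0 : Int)).setIfInBounds 1 1)).size = (n + 1).toNat ∧
    ((PySem.List.pyRange 2 (j + 1) 1).foldl calcStep
        ((Array.replicate (n + 1).toNat (0 : Int)).setIfInBounds 1 1)).getD j.toNat 0 = calculate_coins_alt j := by
  induction j, h1 using Int.le_induction with
  | base =>
      rw [PySem.List.pyRange_one_eq_nil (by norm_num)]
      refine ⟨by simp, ?_⟩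
      simp only [List.foldl_nil]
      rw [show ((1:Int)).toNat = 1 by rfl,
          Array.getD_eq_getD_getElem?, Array.getElem?_setIfInBounds]
      rw [if_pos rfl, if_pos (by simp [Array.size_replicate]; omega)]
      simp [calculate_coins_alt]
  | succ j h1 ih =>
      obtain ⟨hlen, hval⟩ := ih (by omega)
      have hsplit : PySem.List.pyRange 2 (j + 1 + 1) 1 = PySem.List.pyRange 2 (j + 1) 1 ++ [j + 1] :=
        PySem.List.pyRange_one_succ_right (by omega)
      rw [hsplit, List.foldl_append]
      set dp := (PySem.List.pyRange 2 (j + 1) 1).foldl calcStep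
        ((Array.replicate (n + 1).toNat (0 : Int)).setIfInBounds 1 1) with hdp
      simp only [List.foldl_cons, List.foldl_nil]
      have hread : dp.getD (j + 1 - 1).toNat 0 = calculate_coins_alt j := by
        rw [show j + 1 - 1 = j by ring]; exact hval
      have hidx : (j + 1).toNat < dp.size := by rw [hlen]; omega
      constructor
      · unfold calcStep; rw [hread]; simpa using hlen
      · unfold calcStep
        rw [hread]
        rw [Array.getD_eq_getD_getElem?, Array.getElem?_setIfInBounds, if_pos rfl, if_pos hidx]
        have := alt_step (j + 1)
        rw [show j + 1 - 1 = j by ring] at this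
        split_ifs at this ⊢ <;> simp_all

-- ===== VERDICT (by name: the statement is the Claim_ definition above) =====
theorem calculate_coins_spec : Claim_equal_calculate_coins := by
  intro n _ hn
  unfold Pre_calculate_coins at hn
  unfold Spec_calculate_coins calculate_coins
  obtain ⟨hlen, hval⟩ := loop_invariant n hn n (by omega) le_rfl
  set dp := (PySem.List.pyRange 2 (n + 1) 1).foldl calcStep
    ((Array.replicate (n + 1).toNat (0 : Int)).setIfInBounds 1 1) with hdp
  simp only
  rw [← hdp, hlen, show (n + 1).toNat - 1 = n.toNat by omega]
  exact hval
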